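-- pv_equiv track=rewrite | github.com/alexeyserbin/wdb_rb | rb_sim.py | pick_move_table_balance
-- ===== SOURCE A (Python) =====
-- def pick_move_table_balance(table):
--     if not table:
--         return None
--
--     min_idx = 0
--     max_idx = 0
--     for i, e in enumerate(table):
--         if e <= table[min_idx]:
--             min_idx = i
--         if e >= table[max_idx]:
--             max_idx = i
--     if min_idx == max_idx or table[max_idx] - table[min_idx] <= 1:
--         return None
--     return (max_idx, min_idx)
-- ===== SOURCE B (Python) =====
-- def _last_index_of(table, v):
--     r = 0
--     for i, e in enumerate(table):
--         if e == v:
--             r = i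
--     return r
--
--
-- def pick_move_table_balance(table):
--     if not table:
--         return None
--     lo = min(table)
--     hi = max(table)
--     if hi - lo <= 1:
--         return None
--     return (_last_index_of(table, hi), _last_index_of(table, lo))
-- ===== Notes on version B (the rewrite author's own statement) =====
-- stated objective: simpler
-- what changed: Replaces the single combined scan (running min/max indices with <=/>= tie updates) by separate passes: lo=min(table), hi=max(table), one guard hi-lo<=1 (the min_idx==max_idx case is subsumed), then the last index of each extremal value.
import Mathlib
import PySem

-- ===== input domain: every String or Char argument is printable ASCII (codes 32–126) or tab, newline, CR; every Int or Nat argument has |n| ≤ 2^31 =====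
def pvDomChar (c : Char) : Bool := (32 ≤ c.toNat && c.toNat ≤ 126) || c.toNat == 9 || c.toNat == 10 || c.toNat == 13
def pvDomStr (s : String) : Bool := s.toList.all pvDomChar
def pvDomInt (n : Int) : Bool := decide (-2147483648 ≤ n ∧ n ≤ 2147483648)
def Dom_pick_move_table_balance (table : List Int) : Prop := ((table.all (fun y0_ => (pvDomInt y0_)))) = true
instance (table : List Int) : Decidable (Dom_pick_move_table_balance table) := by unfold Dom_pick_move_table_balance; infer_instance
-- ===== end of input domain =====

-- B replaces A's single combined min/max-index scan by separate value passes (lo=min, hi=max),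
-- a single guard hi-lo<=1, and last-index-of lookups; objective: simpler.


-- ===== PORT A =====
-- the for-loop over enumerate(table); table[min_idx]/table[max_idx] are read with pyGetD 0:
-- the indices held in the state are always valid (0 on a nonempty table, then enumerate indices),
-- so the default is never consulted and the read is exact Python indexing.
def pickLoop (table : List Int) : List (Int × Int) → Int × Int → Int × Int
  | [], st => st
  | (i, e) :: rest, (mi, ma) =>
      pickLoop table rest
        (if e ≤ PySem.List.pyGetD table mi 0 then i else mi,
         if e ≥ PySem.List.pyGetD table ma 0 then i else ma)

def pick_move_table_balance (table : List Int) : Option (Int × Int) :=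
  if table = [] then none
  else
    let p := pickLoop table (PySem.List.enumerate table) (0, 0)
    if p.1 = p.2 ∨ PySem.List.pyGetD table p.2 0 - PySem.List.pyGetD table p.1 0 ≤ 1 then none
    else some (p.2, p.1)

-- ===== PORT B =====
-- _last_index_of: fold over enumerate keeping the last index whose value equals v
def lastIdx (v : Int) : List (Int × Int) → Int → Int
  | [], r => r
  | (i, e) :: rest, r => lastIdx v rest (if e = v then i else r)

def pick_move_table_balance_alt (table : List Int) : Option (Int × Int) :=
  match table with
  | [] => none
  | x :: xs =>
    let lo := xs.foldl min x   -- min(table)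
    let hi := xs.foldl max x   -- max(table)
    if hi - lo ≤ 1 then none
    else some (lastIdx hi (PySem.List.enumerate (x :: xs)) 0,
               lastIdx lo (PySem.List.enumerate (x :: xs)) 0)

-- ===== PRECONDITION & SPEC =====
def Spec_pick_move_table_balance (table : List Int) (out : Option (Int × Int)) : Prop := out = pick_move_table_balance_alt table
instance (table : List Int) (out : Option (Int × Int)) : Decidable (Spec_pick_move_table_balance table out) := by unfold Spec_pick_move_table_balance; infer_instance

-- ===== CLAIM (what is proved, stated in full; the proofs are below) =====
def Claim_equal_pick_move_table_balance : Prop := ∀ (table : List Int), Dom_pick_move_table_balance table → Spec_pick_move_table_balance table (pick_move_table_balance table)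

-- ===== LEMMAS AND PROOFS =====

-- pickLoop is the pair of an independent min-index fold and max-index fold
def fmin (table : List Int) : List (Int × Int) → Int → Int
  | [], a => a
  | (i, e) :: rest, a => fmin table rest (if e ≤ PySem.List.pyGetD table a 0 then i else a)

def fmax (table : List Int) : List (Int × Int) → Int → Int
  | [], a => a
  | (i, e) :: rest, a => fmax table rest (if e ≥ PySem.List.pyGetD table a 0 then i else a)

theorem pickLoop_eq (table : List Int) (l : List (Int × Int)) (mi ma : Int) :
    pickLoop table l (mi, ma) = (fmin table l mi, fmax table l ma) := by
  induction l generalizing mi ma with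
  | nil => rfl
  | cons p rest ih => cases p; simp [pickLoop, fmin, fmax, ih]

-- when v is attained in l, the accumulator of lastIdx is irrelevant
theorem lastIdx_acc_irrel (v : Int) (l : List (Int × Int)) (h : ∃ p ∈ l, p.2 = v)
    (a b : Int) : lastIdx v l a = lastIdx v l b := by
  induction l generalizing a b with
  | nil => simp at h
  | cons p rest ih =>
    obtain ⟨i, e⟩ := p
    rcases h with ⟨q, hq, hv⟩
    simp only [List.mem_cons] at hq
    by_cases he : e = v
    · simp [lastIdx, he]
    · rcases hq with rfl | hq
      · exact absurd hv he
      · simp only [lastIdx, if_neg he]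
        exact ih ⟨q, hq, hv⟩ a b

-- the value stored at lastIdx's result is v (provided v at the acc or attained in l)
theorem lastIdx_val (table : List Int) (v : Int) (l : List (Int × Int))
    (hl : ∀ p ∈ l, PySem.List.pyGetD table p.1 0 = p.2) (a : Int)
    (h : PySem.List.pyGetD table a 0 = v ∨ ∃ p ∈ l, p.2 = v) :
    PySem.List.pyGetD table (lastIdx v l a) 0 = v := by
  induction l generalizing a with
  | nil => simpa [lastIdx] using h
  | cons p rest ih =>
    obtain ⟨i, e⟩ := p
    simp only [lastIdx]
    by_cases he : e = v
    · refine ih (fun q hq => hl q (List.mem_cons_of_mem _ hq)) _ (Or.inl ?_)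
      simp only [if_pos he]
      rw [hl (i, e) (List.mem_cons_self)]; exact he
    · simp only [if_neg he]
      refine ih (fun q hq => hl q (List.mem_cons_of_mem _ hq)) a ?_
      rcases h with h | ⟨q, hq, hv⟩
      · exact Or.inl h
      · simp only [List.mem_cons] at hq
        rcases hq with rfl | hq
        · exact absurd hv he
        · exact Or.inr ⟨q, hq, hv⟩

-- MAIN (min side): A's running-min-index fold equals last-index-of the overall minimum
theorem fmin_eq_lastIdx (table : List Int) (l : List (Int × Int))
    (hl : ∀ p ∈ l, PySem.List.pyGetD table p.1 0 = p.2) (a : Int) :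
    fmin table l a
      = lastIdx ((l.map Prod.snd).foldl min (PySem.List.pyGetD table a 0)) l a := by
  induction l generalizing a with
  | nil => rfl
  | cons p rest ih =>
    obtain ⟨i, e⟩ := p
    have hi : PySem.List.pyGetD table i 0 = e := hl (i, e) (List.mem_cons_self)
    have hrest : ∀ p ∈ rest, PySem.List.pyGetD table p.1 0 = p.2 :=
      fun q hq => hl q (List.mem_cons_of_mem _ hq)
    simp only [fmin, lastIdx, List.map_cons, List.foldl_cons]
    set m := PySem.List.pyGetD table a 0 with hm
    by_cases he : e ≤ m
    · -- A updates to index i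
      rw [if_pos he]
      have hmin : min m e = e := min_eq_right he
      simp only [hmin]
      have := ih hrest i
      rw [hi] at this
      rw [this]
      set v := (rest.map Prod.snd).foldl min e with hv
      by_cases hev : e = v
      · rw [if_pos hev]
      · rw [if_neg hev]
        -- v < e, so v is attained in rest; acc is irrelevant
        have hle : v ≤ e := (PySem.List.foldl_min_le (rest.map Prod.snd) e).1
        have hmem : v = e ∨ v ∈ rest.map Prod.snd :=
          PySem.List.foldl_min_mem (rest.map Prod.snd) e
        rcases hmem with h' | h'
        · exact absurd h'.symm hev
        · obtain ⟨q, hq, hqv⟩ := List.mem_map.mp h'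
          exact lastIdx_acc_irrel v rest ⟨q, hq, hqv⟩ i a
    · -- A keeps index a
      rw [if_neg he]
      push_neg at he
      have hmin : min m e = m := min_eq_left he.le
      simp only [hmin]
      set v := (rest.map Prod.snd).foldl min m with hv
      have hvm : v ≤ m := (PySem.List.foldl_min_le (rest.map Prod.snd) m).1
      have hev : ¬ e = v := by omega
      rw [if_neg hev]
      exact ih hrest a
-- MAIN (max side): mirror image
theorem fmax_eq_lastIdx (table : List Int) (l : List (Int × Int))
    (hl : ∀ p ∈ l, PySem.List.pyGetD table p.1 0 = p.2) (a : Int) :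
    fmax table l a
      = lastIdx ((l.map Prod.snd).foldl max (PySem.List.pyGetD table a 0)) l a := by
  induction l generalizing a with
  | nil => rfl
  | cons p rest ih =>
    obtain ⟨i, e⟩ := p
    have hi : PySem.List.pyGetD table i 0 = e := hl (i, e) (List.mem_cons_self)
    have hrest : ∀ p ∈ rest, PySem.List.pyGetD table p.1 0 = p.2 :=
      fun q hq => hl q (List.mem_cons_of_mem _ hq)
    simp only [fmax, lastIdx, List.map_cons, List.foldl_cons]
    set m := PySem.List.pyGetD table a 0 with hm
    by_cases he : e ≥ m
    · rw [if_pos he]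
      have hmax : max m e = e := max_eq_right he
      simp only [hmax]
      have := ih hrest i
      rw [hi] at this
      rw [this]
      set v := (rest.map Prod.snd).foldl max e with hv
      by_cases hev : e = v
      · rw [if_pos hev]
      · rw [if_neg hev]
        have hle : e ≤ v := (PySem.List.le_foldl_max (rest.map Prod.snd) e).1
        have hmem : v = e ∨ v ∈ rest.map Prod.snd :=
          PySem.List.foldl_max_mem (rest.map Prod.snd) e
        rcases hmem with h' | h'
        · exact absurd h'.symm hev
        · obtain ⟨q, hq, hqv⟩ := List.mem_map.mp h'
          exact lastIdx_acc_irrel v rest ⟨q, hq, hqv⟩ i a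
    · rw [if_neg he]
      push_neg at he
      have hmax : max m e = m := max_eq_left he.le
      simp only [hmax]
      set v := (rest.map Prod.snd).foldl max m with hv
      have hvm : m ≤ v := (PySem.List.le_foldl_max (rest.map Prod.snd) m).1
      have hev : ¬ e = v := by omega
      rw [if_neg hev]
      exact ih hrest a

-- consistency of enumerate with pyGetD
theorem enum_consistent (table : List Int) :
    ∀ p ∈ PySem.List.enumerate table, PySem.List.pyGetD table p.1 0 = p.2 := by
  intro p hp
  rw [PySem.List.mem_enumerate_iff] at hp
  obtain ⟨k, hk, rfl⟩ := hp
  simp [PySem.List.pyGetD_natCast, List.getD_eq_getElem?_getD, hk]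

-- ===== VERDICT (by name: the statement is the Claim_ definition above) =====
theorem pick_move_table_balance_spec : Claim_equal_pick_move_table_balance := by
  intro table _
  show pick_move_table_balance table = pick_move_table_balance_alt table
  match table with
  | [] => rfl
  | x :: xs =>
    simp only [pick_move_table_balance, pick_move_table_balance_alt, if_neg (List.cons_ne_nil x xs)]
    set l := PySem.List.enumerate (x :: xs) with hls
    have hl := enum_consistent (x :: xs)
    have h0 : PySem.List.pyGetD (x :: xs) 0 0 = x := by
      simp [PySem.List.pyGetD_zero_cons]
    have hsnd : l.map Prod.snd = x :: xs := PySem.List.map_snd_enumerate (x :: xs) 0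
    have hlo : (l.map Prod.snd).foldl min (PySem.List.pyGetD (x :: xs) 0 0) = xs.foldl min x := by
      rw [h0, hsnd]; simp [List.foldl_cons]
    have hhi : (l.map Prod.snd).foldl max (PySem.List.pyGetD (x :: xs) 0 0) = xs.foldl max x := by
      rw [h0, hsnd]; simp [List.foldl_cons]
    set lo := xs.foldl min x with hlodef
    set hi := xs.foldl max x with hhidef
    have hmi : fmin (x :: xs) l 0 = lastIdx lo l 0 := by
      rw [fmin_eq_lastIdx (x :: xs) l hl 0, hlo]
    have hma : fmax (x :: xs) l 0 = lastIdx hi l 0 := by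
      rw [fmax_eq_lastIdx (x :: xs) l hl 0, hhi]
    rw [pickLoop_eq, hmi, hma]
    -- values at the resulting indices
    have hloatt : PySem.List.pyGetD (x :: xs) 0 0 = lo ∨ ∃ p ∈ l, p.2 = lo := by
      rcases PySem.List.foldl_min_mem xs x with h | h
      · left; rw [h0, hlodef]; exact h.symm
      · right
        have : lo ∈ l.map Prod.snd := by rw [hsnd]; exact List.mem_cons_of_mem _ h
        obtain ⟨q, hq, hqv⟩ := List.mem_map.mp this
        exact ⟨q, hq, hqv⟩
    have hhiatt : PySem.List.pyGetD (x :: xs) 0 0 = hi ∨ ∃ p ∈ l, p.2 = hi := by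
      rcases PySem.List.foldl_max_mem xs x with h | h
      · left; rw [h0, hhidef]; exact h.symm
      · right
        have : hi ∈ l.map Prod.snd := by rw [hsnd]; exact List.mem_cons_of_mem _ h
        obtain ⟨q, hq, hqv⟩ := List.mem_map.mp this
        exact ⟨q, hq, hqv⟩
    have hvlo : PySem.List.pyGetD (x :: xs) (lastIdx lo l 0) 0 = lo := lastIdx_val _ lo l hl 0 hloatt
    have hvhi : PySem.List.pyGetD (x :: xs) (lastIdx hi l 0) 0 = hi := lastIdx_val _ hi l hl 0 hhiatt
    simp only [hvlo, hvhi]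
    by_cases hg : hi - lo ≤ 1
    · rw [if_pos (Or.inr hg), if_pos hg]
    · have hne : lastIdx lo l 0 ≠ lastIdx hi l 0 := by
        intro h
        rw [h, hvhi] at hvlo
        omega
      rw [if_neg (by push_neg; exact ⟨hne, by omega⟩), if_neg hg]
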